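-- pv_equiv track=rewrite | github.com/datawhales/Python-Code-Notes | ps/pgs_77484.py | solution
-- ===== SOURCE A (Python) =====
-- def solution(lottos, win_nums):
--     result = 0
--     array = [0] * 46
--     for num in lottos:
--         array[num] += 1
--     for win_num in win_nums:
--         result += array[win_num]
--     answer = [result + array[0], result]
--     answer = [7 - x if x != 0 else 6 for x in answer]
--     return answer
-- ===== SOURCE B (Python) =====
-- def solution(lottos, win_nums):
--     ls = sorted(lottos)
--     ws = sorted(win_nums)
--     matches = 0
--     i = j = 0
--     while i < len(ls) and j < len(ws):
--         if ls[i] < ws[j]: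
--             i += 1
--         elif ws[j] < ls[i]:
--             j += 1
--         else:
--             v = ls[i]
--             a = 0
--             while i < len(ls) and ls[i] == v:
--                 i += 1
--                 a += 1
--             b = 0
--             while j < len(ws) and ws[j] == v:
--                 j += 1
--                 b += 1
--             matches += a * b
--     zeros = lottos.count(0)
--     return [7 - x if x != 0 else 6 for x in [matches + zeros, matches]]
-- ===== Notes on version B (the rewrite author's own statement) =====
-- stated objective: alternative
-- what changed: Replaces the 46-bucket frequency array with a sort-merge join: both lists are sorted and a two-pointer scan multiplies the lengths of equal-value runs to count matching pairs with multiplicity.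
-- intended difference: On in-range inputs where a negative number aliases a counted bucket (a lotto number equal to some win number ±46, or -46 aliasing bucket 0, visible through the 0/1->6 rank collision), A counts the aliased pair as a match or zero via Python negative indexing while B counts only exact value matches, the intended lottery semantics. — e.g. on solution([-1, 45], [45]): A returns [5, 5], B returns [6, 6]
import Mathlib
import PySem

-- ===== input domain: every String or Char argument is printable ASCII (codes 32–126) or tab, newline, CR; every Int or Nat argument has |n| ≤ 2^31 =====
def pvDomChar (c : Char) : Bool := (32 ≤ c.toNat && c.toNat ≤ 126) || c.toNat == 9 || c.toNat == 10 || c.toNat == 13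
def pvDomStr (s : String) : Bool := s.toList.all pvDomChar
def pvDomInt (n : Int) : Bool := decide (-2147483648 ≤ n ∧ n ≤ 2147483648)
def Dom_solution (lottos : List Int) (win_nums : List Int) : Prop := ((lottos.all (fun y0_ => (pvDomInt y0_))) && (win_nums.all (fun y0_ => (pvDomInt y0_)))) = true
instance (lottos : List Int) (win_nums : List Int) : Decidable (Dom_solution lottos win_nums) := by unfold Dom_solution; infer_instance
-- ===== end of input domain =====

-- B replaces A's 46-bucket frequency array by a sort-merge join (sort both lists, two-pointer
-- scan multiplying equal-run lengths); on inputs where negative numbers alias a counted bucket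
-- (see D_) B's exact counting is the intended value.

-- ===== PORT A =====
def solution (lottos : List Int) (win_nums : List Int) : List Int :=
  let array : List Int :=
    lottos.foldl (fun arr num => PySem.List.pySetD arr num (PySem.List.pyGetD arr num 0 + 1))
      (List.replicate 46 (0 : Int))
  let result : Int := win_nums.foldl (fun r w => r + PySem.List.pyGetD array w 0) 0
  let answer : List Int := [result + PySem.List.pyGetD array 0 0, result]
  answer.map (fun x => if x ≠ 0 then 7 - x else 6)

-- ===== PORT B =====
-- the inner `while ls[i] == v` run loops of Source B: leading-run length and the remainder
def pvRun (v : Int) : List Int → Nat × List Int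
  | [] => (0, [])
  | x :: xs => if x = v then let p := pvRun v xs; (p.1 + 1, p.2) else (0, x :: xs)

theorem pvRun_len_le (v : Int) (xs : List Int) : (pvRun v xs).2.length ≤ xs.length := by
  induction xs with
  | nil => simp [pvRun]
  | cons x xs ih => simp only [pvRun]; split_ifs <;> simp <;> omega

-- the outer two-pointer while loop of Source B
def pvJoin : List Int → List Int → Int
  | [], _ => 0
  | _ :: _, [] => 0
  | l :: ls, w :: ws =>
    if l < w then pvJoin ls (w :: ws)
    else if w < l then pvJoin (l :: ls) ws
    else
      let p := pvRun l (l :: ls)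
      let q := pvRun l (w :: ws)
      (p.1 : Int) * (q.1 : Int) + pvJoin p.2 q.2
termination_by ls ws => ls.length + ws.length
decreasing_by
  · simp
  · simp
  · have h1 := pvRun_len_le l ls
    have h2 := pvRun_len_le l ws
    rcases eq_or_ne w l with h | h <;> simp [pvRun, h] <;> omega

def solution_alt (lottos : List Int) (win_nums : List Int) : List Int :=
  let ls := PySem.List.sorted lottos (fun x => x) false
  let ws := PySem.List.sorted win_nums (fun x => x) false
  let matched : Int := pvJoin ls ws
  let zeros : Int := lottos.count 0
  [matched + zeros, matched].map (fun x => if x ≠ 0 then 7 - x else 6)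

-- ===== PRECONDITION & SPEC =====
-- Pre_ admits exactly the inputs on which A returns: every number in -46..45; outside it A raises IndexError.
def Pre_solution (lottos : List Int) (win_nums : List Int) : Prop :=
  (∀ l ∈ lottos, -46 ≤ l ∧ l ≤ 45) ∧ (∀ w ∈ win_nums, -46 ≤ w ∧ w ≤ 45)
instance (lottos : List Int) (win_nums : List Int) : Decidable (Pre_solution lottos win_nums) := by
  unfold Pre_solution; infer_instance
def pvWitness_solution : List Int × List Int := ([1, 2, 3, 0], [3, 2, 44])

-- On inputs where some negative number aliases a counted bucket by Python negative indexing — a lotto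
-- number l equal to w±46 for a win number w, or -46 aliasing bucket 0 — A counts the aliased pair as a
-- match/zero while B counts only exact value matches, the intended lottery semantics (unless the aliases'
-- effect is absorbed by the 0↦6, 1↦6 collision of the rank mapping, which D_ excludes).
def D_solution (lottos : List Int) (win_nums : List Int) : Prop :=
  let ps := (0 :: win_nums).product lottos
  1 < ps.countP (fun p => (p.1 - p.2).natAbs == 46) + min (ps.countP (fun p => p.1 == p.2)) 1
instance (lottos : List Int) (win_nums : List Int) : Decidable (D_solution lottos win_nums) := by
  unfold D_solution; infer_instance

def Spec_solution (lottos : List Int) (win_nums : List Int) (out : List Int) : Prop := ¬ D_solution lottos win_nums → out = solution_alt lottos win_nums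
instance (lottos : List Int) (win_nums : List Int) (out : List Int) : Decidable (Spec_solution lottos win_nums out) := by unfold Spec_solution; infer_instance

def pvDiffWitness_solution : List Int × List Int := ([-1, 45], [45])
def pvDiffWitnessOut_solution : (List Int) × (List Int) := ([5, 5], [6, 6])

-- ===== CLAIM (what is proved, stated in full; the proofs are below) =====
def Claim_unchanged_solution : Prop := ∀ (lottos : List Int) (win_nums : List Int), Dom_solution lottos win_nums → Pre_solution lottos win_nums → Spec_solution lottos win_nums (solution lottos win_nums)
def Claim_changed_solution : Prop := Dom_solution (pvDiffWitness_solution.1) (pvDiffWitness_solution.2) ∧ Pre_solution (pvDiffWitness_solution.1) (pvDiffWitness_solution.2) ∧ D_solution (pvDiffWitness_solution.1) (pvDiffWitness_solution.2) ∧ solution (pvDiffWitness_solution.1) (pvDiffWitness_solution.2) = pvDiffWitnessOut_solution.1 ∧ solution_alt (pvDiffWitness_solution.1) (pvDiffWitness_solution.2) = pvDiffWitnessOut_solution.2 ∧ pvDiffWitnessOut_solution.1 ≠ pvDiffWitnessOut_solution.2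
def Claim_exact_solution : Prop := ∀ (lottos : List Int) (win_nums : List Int), Dom_solution lottos win_nums → Pre_solution lottos win_nums → D_solution lottos win_nums → solution lottos win_nums ≠ solution_alt lottos win_nums

-- ===== LEMMAS AND PROOFS =====

-- Python's resolution of index l into the 46-element array.
def pvIdx (l : Int) : Nat := if 0 ≤ l then l.toNat else 46 - (-l).toNat

-- the rank mapping
def pvF (x : Int) : Int := if x ≠ 0 then 7 - x else 6

theorem pv_idx_lt (l : Int) (h0 : -46 ≤ l) (h1 : l ≤ 45) : pvIdx l < 46 := by
  simp only [pvIdx]; split_ifs <;> omega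

theorem pv_pyGetD_idx (arr : List Int) (ha : arr.length = 46) (l : Int)
    (h0 : -46 ≤ l) (h1 : l ≤ 45) :
    PySem.List.pyGetD arr l 0 = arr.getD (pvIdx l) 0 := by
  rcases le_or_gt 0 l with hc | hc
  · rw [PySem.List.pyGetD_eq_getElem arr 0 hc (by omega),
        List.getD_eq_getElem arr 0 (by rw [ha]; exact pv_idx_lt l h0 h1)]
    congr 1
    simp [pvIdx, hc]
  · have hl' : l = -(((-l).toNat : Nat) : Int) := by omega
    calc PySem.List.pyGetD arr l 0
        = PySem.List.pyGetD arr (-(((-l).toNat : Nat) : Int)) 0 := by rw [← hl']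
      _ = arr[arr.length - (-l).toNat] :=
          PySem.List.pyGetD_neg_natCast arr (-l).toNat 0 (by omega) (by omega)
      _ = arr.getD (pvIdx l) 0 := by
          rw [List.getD_eq_getElem arr 0 (by rw [ha]; exact pv_idx_lt l h0 h1)]
          congr 1
          simp only [pvIdx, if_neg (by omega : ¬ (0:Int) ≤ l), ha]

theorem pv_step_eq (arr : List Int) (ha : arr.length = 46) (l : Int) (h0 : -46 ≤ l) (h1 : l ≤ 45) :
    PySem.List.pySetD arr l (PySem.List.pyGetD arr l 0 + 1)
      = arr.set (pvIdx l) (arr.getD (pvIdx l) 0 + 1) := by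
  have hidx : PySem.List.pyIdx? arr.length l = some (pvIdx l) := by
    simp only [PySem.List.pyIdx?, pvIdx, ha]
    split_ifs <;> first | rfl | omega
  have hget : PySem.List.pyGetD arr l 0 = arr.getD (pvIdx l) 0 :=
    pv_pyGetD_idx arr ha l h0 h1
  rw [hget]
  simp only [PySem.List.pySetD, PySem.List.pySet?, hidx, Option.map_some, Option.getD_some]

theorem pv_fold_count (ls : List Int) (h : ∀ l ∈ ls, -46 ≤ l ∧ l ≤ 45) :
    ∀ (arr : List Int), arr.length = 46 →
      ((ls.foldl (fun arr num => PySem.List.pySetD arr num (PySem.List.pyGetD arr num 0 + 1)) arr).length = 46 ∧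
       ∀ i : Nat, i < 46 →
        (ls.foldl (fun arr num => PySem.List.pySetD arr num (PySem.List.pyGetD arr num 0 + 1)) arr).getD i 0
          = arr.getD i 0 + (ls.countP (fun l => pvIdx l == i) : Int)) := by
  induction ls with
  | nil => intro arr ha; exact ⟨ha, by simp⟩
  | cons l ls ih =>
    intro arr ha
    obtain ⟨hl0, hl1⟩ := h l (List.mem_cons_self)
    have hstep := pv_step_eq arr ha l hl0 hl1
    have hlen : (arr.set (pvIdx l) (arr.getD (pvIdx l) 0 + 1)).length = 46 := by simp [ha]
    have ihs := ih (fun x hx => h x (List.mem_cons_of_mem _ hx)) _ hlen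
    refine ⟨by simpa [List.foldl_cons, hstep] using ihs.1, ?_⟩
    intro i hi
    rw [List.foldl_cons, hstep, ihs.2 i hi]
    have hcount : (((l :: ls).countP (fun x => pvIdx x == i) : Nat) : Int)
        = (if pvIdx l = i then 1 else 0) + ((ls.countP (fun x => pvIdx x == i) : Nat) : Int) := by
      by_cases hli : pvIdx l = i
      · simp [hli]; omega
      · simp [hli]
    rw [hcount]
    by_cases hli : pvIdx l = i
    · subst hli
      rw [List.getD_eq_getElem?_getD, List.getElem?_set_self (by simp [ha]; exact lt_of_lt_of_le hi (by omega))]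
      rw [if_pos rfl]
      simp only [Option.getD_some]
      omega
    · rw [List.getD_eq_getElem?_getD, List.getElem?_set_ne hli, if_neg hli,
          ← List.getD_eq_getElem?_getD]
      omega

-- splitting a bucket count into the exact count and the aliased (±46) count
theorem pv_countP_split (ls : List Int) (h : ∀ l ∈ ls, -46 ≤ l ∧ l ≤ 45) (w : Int)
    (hw0 : -46 ≤ w) (hw1 : w ≤ 45) :
    (ls.countP (fun l => pvIdx l == pvIdx w) : Int)
      = (ls.count w : Int) + (ls.countP (fun l => decide (l = w - 46 ∨ l = w + 46)) : Int) := by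
  induction ls with
  | nil => simp
  | cons l ls ih =>
    obtain ⟨hl0, hl1⟩ := h l (List.mem_cons_self)
    have ih' := ih (fun x hx => h x (List.mem_cons_of_mem _ hx))
    have hiff : (pvIdx l = pvIdx w) ↔ (l = w ∨ l = w - 46 ∨ l = w + 46) := by
      simp only [pvIdx]
      split_ifs <;> omega
    simp only [List.countP_cons, List.count_cons]
    by_cases hlw : l = w
    · have h1 : (pvIdx l == pvIdx w) = true := by simp [hlw]
      have h2 : (decide (l = w - 46 ∨ l = w + 46)) = false := by simp; omega
      have h3 : (l == w) = true := by simp [hlw]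
      rw [h1, h2, h3]
      push_cast
      omega
    · by_cases hal : l = w - 46 ∨ l = w + 46
      · have h1 : (pvIdx l == pvIdx w) = true := by simp [hiff]; tauto
        have h2 : (decide (l = w - 46 ∨ l = w + 46)) = true := by simpa using hal
        have h3 : (l == w) = false := by simp [hlw]
        rw [h1, h2, h3]
        push_cast
        omega
      · have h1 : (pvIdx l == pvIdx w) = false := by
          simp only [beq_eq_false_iff_ne, ne_eq, hiff]
          tauto
        have h2 : (decide (l = w - 46 ∨ l = w + 46)) = false := by simpa using hal
        have h3 : (l == w) = false := by simp [hlw]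
        rw [h1, h2, h3]
        push_cast
        omega

-- in range -46..45 the bucket-0 aliases l = 0-46 / l = 0+46 are exactly the occurrences of -46
theorem pv_alias0 (ls : List Int) (h : ∀ l ∈ ls, -46 ≤ l ∧ l ≤ 45) :
    ls.countP (fun l => decide (l = 0 - 46 ∨ l = 0 + 46)) = ls.count (-46) := by
  apply List.countP_congr
  intro l hl
  have hb := h l hl
  constructor
  · intro h'
    have h'' := of_decide_eq_true h'
    have hl46 : l = -46 := by omega
    simp [hl46]
  · intro h'
    have hl46 : l = -46 := by simpa using h'
    simp [hl46]

-- the characterization of A's output in terms of exact and aliased counts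
theorem pv_A_char (lottos win_nums : List Int) (hpre : Pre_solution lottos win_nums) :
    solution lottos win_nums
      = [pvF ((win_nums.map (fun w => (lottos.count w : Int))).sum
              + (win_nums.map (fun w => (lottos.countP (fun l => decide (l = w - 46 ∨ l = w + 46)) : Int))).sum
              + ((lottos.count 0 : Int) + (lottos.count (-46) : Int))),
         pvF ((win_nums.map (fun w => (lottos.count w : Int))).sum
              + (win_nums.map (fun w => (lottos.countP (fun l => decide (l = w - 46 ∨ l = w + 46)) : Int))).sum)] := by
  obtain ⟨hL, hW⟩ := hpre
  unfold solution
  dsimp only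
  have hbase : (List.replicate 46 (0 : Int)).length = 46 := by simp
  obtain ⟨hlen, hspec⟩ := pv_fold_count lottos hL _ hbase
  set arrF := lottos.foldl (fun arr num => PySem.List.pySetD arr num (PySem.List.pyGetD arr num 0 + 1)) (List.replicate 46 (0 : Int)) with harr
  have harrget : ∀ w : Int, -46 ≤ w → w ≤ 45 →
      PySem.List.pyGetD arrF w 0 = (lottos.count w : Int) + (lottos.countP (fun l => decide (l = w - 46 ∨ l = w + 46)) : Int) := by
    intro w h0 h1
    have hidx : pvIdx w < 46 := pv_idx_lt w h0 h1
    have hget : PySem.List.pyGetD arrF w 0 = arrF.getD (pvIdx w) 0 :=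
      pv_pyGetD_idx arrF hlen w h0 h1
    have hbase0 : (List.replicate 46 (0 : Int)).getD (pvIdx w) 0 = 0 := by
      rw [List.getD_eq_getElem?_getD, List.getElem?_replicate]
      split <;> rfl
    rw [hget, hspec (pvIdx w) hidx, hbase0, zero_add, pv_countP_split lottos hL w h0 h1]
  have hres : win_nums.foldl (fun r w => r + PySem.List.pyGetD arrF w 0) 0
      = (win_nums.map (fun w => (lottos.count w : Int))).sum
        + (win_nums.map (fun w => (lottos.countP (fun l => decide (l = w - 46 ∨ l = w + 46)) : Int))).sum := by
    rw [PySem.List.foldl_add win_nums (fun w => PySem.List.pyGetD arrF w 0) 0, zero_add,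
        List.map_congr_left (fun w hw => harrget w (hW w hw).1 (hW w hw).2),
        PySem.List.sum_map_add_int]
  have h00 : PySem.List.pyGetD arrF 0 0 = (lottos.count 0 : Int) + (lottos.count (-46) : Int) := by
    rw [harrget 0 (by norm_num) (by norm_num)]
    congr 1
    rw [pv_alias0 lottos hL]
  rw [hres, h00]
  simp [pvF]

-- ---- B-side: the sort-merge join computes Σ_{w ∈ ws} ls.count w on sorted lists ----

theorem pvRun_spec (v : Int) (xs : List Int) (hs : xs.Pairwise (· ≤ ·)) (hv : ∀ y ∈ xs, v ≤ y) :
    xs = List.replicate (pvRun v xs).1 v ++ (pvRun v xs).2 ∧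
    (∀ y ∈ (pvRun v xs).2, v < y) ∧ (pvRun v xs).2.Pairwise (· ≤ ·) := by
  induction xs with
  | nil => simp [pvRun]
  | cons x xs ih =>
    by_cases hx : x = v
    · have ihs := ih hs.of_cons (fun y hy => hx ▸ List.rel_of_pairwise_cons hs hy)
      simp only [pvRun, if_pos hx]
      refine ⟨?_, ihs.2.1, ihs.2.2⟩
      rw [List.replicate_succ, List.cons_append, ← ihs.1, hx]
    · simp only [pvRun, if_neg hx]
      refine ⟨by simp, ?_, hs⟩
      intro y hy
      rcases List.mem_cons.mp hy with rfl | hy'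
      · exact lt_of_le_of_ne (hv y List.mem_cons_self) (fun h => hx h.symm)
      · exact lt_of_lt_of_le
          (lt_of_le_of_ne (hv x List.mem_cons_self) (fun h => hx h.symm))
          (List.rel_of_pairwise_cons hs hy')

theorem pv_count_run (a : Nat) (v : Int) (r : List Int) (hr : ∀ y ∈ r, v < y) :
    ((List.replicate a v ++ r).count v : Int) = a := by
  rw [List.count_append, List.count_replicate,
      List.count_eq_zero_of_not_mem (fun hm => lt_irrefl v (hr v hm))]
  simp

theorem pv_count_run_gt (a : Nat) (v w : Int) (r : List Int) (hw : v < w) :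
    (List.replicate a v ++ r).count w = r.count w := by
  rw [List.count_append, List.count_replicate, if_neg (by simp; omega), zero_add]

theorem pv_join_spec : ∀ n (ls ws : List Int), ls.length + ws.length ≤ n →
    ls.Pairwise (· ≤ ·) → ws.Pairwise (· ≤ ·) →
    pvJoin ls ws = (ws.map (fun w => (ls.count w : Int))).sum := by
  intro n
  induction n with
  | zero =>
    intro ls ws hn _ _
    have hls : ls = [] := List.eq_nil_of_length_eq_zero (by omega)
    have hws : ws = [] := List.eq_nil_of_length_eq_zero (by omega)
    subst hls; subst hws; simp [pvJoin]
  | succ n ih =>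
    intro ls ws hn hsl hsw
    match ls, ws with
    | [], ws => simp [pvJoin]
    | l :: ls, [] => simp [pvJoin]
    | l :: ls, w :: ws =>
      rcases lt_trichotomy l w with hlw | hlw | hlw
      · -- l < w : dropping l changes no count, every element of w :: ws is ≥ w > l
        rw [pvJoin, if_pos hlw]
        rw [ih ls (w :: ws) (by simp at hn ⊢; omega) hsl.of_cons hsw]
        apply congrArg
        apply List.map_congr_left
        intro x hx
        have hwx : w ≤ x := by
          rcases List.mem_cons.mp hx with rfl | hx'
          · exact le_refl x
          · exact List.rel_of_pairwise_cons hsw hx'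
        simp [List.count_cons]
        omega
      · -- l = w : consume the equal runs
        subst hlw
        have hvL : ∀ y ∈ l :: ls, l ≤ y := by
          intro y hy
          rcases List.mem_cons.mp hy with rfl | hy'
          · exact le_refl y
          · exact List.rel_of_pairwise_cons hsl hy'
        have hvW : ∀ y ∈ l :: ws, l ≤ y := by
          intro y hy
          rcases List.mem_cons.mp hy with rfl | hy'
          · exact le_refl y
          · exact List.rel_of_pairwise_cons hsw hy'
        obtain ⟨heqL, hgtL, hslr⟩ := pvRun_spec l (l :: ls) hsl hvL
        obtain ⟨heqW, hgtW, hsws⟩ := pvRun_spec l (l :: ws) hsw hvW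
        set a := (pvRun l (l :: ls)).1 with hadef
        set r := (pvRun l (l :: ls)).2 with hrdef
        set b := (pvRun l (l :: ws)).1 with hbdef
        set s := (pvRun l (l :: ws)).2 with hsdef
        have ha1 : 1 ≤ a := by
          by_contra hc
          have ha0 : a = 0 := by omega
          rw [ha0, List.replicate_zero, List.nil_append] at heqL
          exact lt_irrefl l (hgtL l (heqL ▸ List.mem_cons_self))
        have hb1 : 1 ≤ b := by
          by_contra hc
          have hb0 : b = 0 := by omega
          rw [hb0, List.replicate_zero, List.nil_append] at heqW
          exact lt_irrefl l (hgtW l (heqW ▸ List.mem_cons_self))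
        have hlenL := congrArg List.length heqL
        have hlenW := congrArg List.length heqW
        simp only [List.length_append, List.length_replicate, List.length_cons] at hlenL hlenW
        have hIH := ih r s (by simp only [List.length_cons] at hn; omega) hslr hsws
        have hcountl : ((l :: ls).count l : Int) = a := by
          rw [heqL]; exact pv_count_run a l r hgtL
        have hs_part : (s.map (fun w => ((l :: ls).count w : Int))) = (s.map (fun w => ((r.count w : Nat) : Int))) :=
          List.map_congr_left (fun w hw => by rw [heqL, pv_count_run_gt a l w r (hgtW w hw)])
        rw [pvJoin, if_neg (lt_irrefl l), if_neg (lt_irrefl l)]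
        dsimp only
        rw [← hadef, ← hbdef, ← hrdef, ← hsdef]
        conv_rhs => rw [heqW, List.map_append, List.sum_append]
        rw [hs_part, ← hIH]
        simp only [List.map_replicate, List.sum_replicate, hcountl, nsmul_eq_mul]
        ring
      · -- w < l : count of w in l :: ls is 0
        rw [pvJoin, if_neg (by omega), if_pos hlw]
        rw [ih (l :: ls) ws (by simp at hn ⊢; omega) hsl hsw.of_cons]
        have hc : ((l :: ls).count w : Int) = 0 := by
          have hnm : w ∉ l :: ls := by
            intro hm
            rcases List.mem_cons.mp hm with rfl | hm'
            · omega
            · exact absurd (List.rel_of_pairwise_cons hsl hm') (by omega)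
          simp [List.count_eq_zero_of_not_mem hnm]
        simp only [List.map_cons, List.sum_cons, hc, zero_add]

theorem pv_B_char (lottos win_nums : List Int) :
    solution_alt lottos win_nums
      = [pvF ((win_nums.map (fun w => (lottos.count w : Int))).sum + (lottos.count 0 : Int)),
         pvF ((win_nums.map (fun w => (lottos.count w : Int))).sum)] := by
  unfold solution_alt
  dsimp only
  have hpl : (PySem.List.sorted lottos (fun x => x) false).Perm lottos := PySem.List.sorted_perm _ _ _
  have hpw : (PySem.List.sorted win_nums (fun x => x) false).Perm win_nums := PySem.List.sorted_perm _ _ _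
  have hj : pvJoin (PySem.List.sorted lottos (fun x => x) false) (PySem.List.sorted win_nums (fun x => x) false)
      = (win_nums.map (fun w => (lottos.count w : Int))).sum := by
    rw [pv_join_spec ((PySem.List.sorted lottos (fun x => x) false).length + (PySem.List.sorted win_nums (fun x => x) false).length)
        _ _ (le_refl _) (PySem.List.sorted_pairwise _ _) (PySem.List.sorted_pairwise _ _)]
    rw [show ((PySem.List.sorted win_nums (fun x => x) false).map
          (fun w => ((PySem.List.sorted lottos (fun x => x) false).count w : Int)))
        = ((PySem.List.sorted win_nums (fun x => x) false).map (fun w => (lottos.count w : Int))) from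
      List.map_congr_left (fun w _ => by rw [hpl.count_eq])]
    exact (hpw.map (fun w => (lottos.count w : Int))).sum_eq
  rw [hj]
  simp [pvF]

-- countP over a product counts row-wise
theorem pv_countP_product (xs ys : List Int) (p : Int × Int → Bool) :
    (xs.product ys).countP p = (xs.map (fun x => ys.countP (fun y => p (x, y)))).sum := by
  induction xs with
  | nil => simp [List.product]
  | cons x xs ih =>
    simp only [List.product] at ih ⊢
    simp only [List.flatMap_cons, List.countP_append, List.countP_map, List.map_cons,
      List.sum_cons, ih]
    rfl

-- D_ in terms of the exact/alias counts used by pv_A_char / pv_B_char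
theorem pv_D_char (lottos win_nums : List Int) (hL : ∀ l ∈ lottos, -46 ≤ l ∧ l ≤ 45) :
    D_solution lottos win_nums ↔
      1 < lottos.count (-46)
            + (win_nums.map (fun w => lottos.countP (fun l => decide (l = w - 46 ∨ l = w + 46)))).sum
            + min (lottos.count 0 + (win_nums.map (fun w => lottos.count w)).sum) 1 := by
  have hcz : ((0 :: win_nums).product lottos).countP (fun p => (p.1 - p.2).natAbs == 46)
      = lottos.count (-46)
        + (win_nums.map (fun w => lottos.countP (fun l => decide (l = w - 46 ∨ l = w + 46)))).sum := by
    rw [pv_countP_product, List.map_cons, List.sum_cons]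
    congr 1
    · rw [← pv_alias0 lottos hL]
      apply List.countP_congr
      intro l _
      constructor
      · intro h'; have := of_decide_eq_true h'; simp; omega
      · intro h'; have := of_decide_eq_true h'; simp; omega
    · apply congrArg
      apply List.map_congr_left
      intro w _
      apply List.countP_congr
      intro l _
      constructor
      · intro h'; have := of_decide_eq_true h'; simp; omega
      · intro h'; have := of_decide_eq_true h'; simp; omega
  have hez : ((0 :: win_nums).product lottos).countP (fun p => p.1 == p.2)
      = lottos.count 0 + (win_nums.map (fun w => lottos.count w)).sum := by
    rw [pv_countP_product, List.map_cons, List.sum_cons]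
    congr 1
    · apply List.countP_congr
      intro l _
      constructor <;> intro h <;> (simp only [beq_iff_eq] at h ⊢; omega)
    · apply congrArg
      apply List.map_congr_left
      intro w _
      apply List.countP_congr
      intro l _
      constructor <;> intro h <;> (simp only [beq_iff_eq] at h ⊢; omega)
  unfold D_solution
  dsimp only
  rw [hcz, hez]

theorem pv_cast_sum (l : List Int) (f : Int → Nat) :
    (((l.map f).sum : Nat) : Int) = (l.map (fun w => ((f w : Nat) : Int))).sum := by
  rw [Nat.cast_list_sum, List.map_map]
  rfl

-- ===== VERDICT (by name: the statement is the Claim_ definition above) =====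
theorem solution_spec : Claim_unchanged_solution := by
  intro lottos win_nums _ hpre hnd
  rw [pv_A_char lottos win_nums hpre, pv_B_char lottos win_nums,
      ← pv_cast_sum win_nums (fun w => lottos.count w),
      ← pv_cast_sum win_nums (fun w => lottos.countP (fun l => decide (l = w - 46 ∨ l = w + 46)))]
  rw [pv_D_char lottos win_nums hpre.1] at hnd
  simp only [List.cons.injEq, and_true]
  refine ⟨?_, ?_⟩ <;> simp only [pvF] <;> split_ifs <;> omega

theorem solution_changed : Claim_changed_solution := by
  unfold Claim_changed_solution
  refine ⟨by decide, by decide, by decide, by decide, ?_, by decide⟩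
  rw [show pvDiffWitness_solution.1 = [(-1 : Int), 45] from rfl,
      show pvDiffWitness_solution.2 = [(45 : Int)] from rfl, pv_B_char]
  decide

theorem solution_tight : Claim_exact_solution := by
  intro lottos win_nums _ hpre hd
  rw [pv_A_char lottos win_nums hpre, pv_B_char lottos win_nums,
      ← pv_cast_sum win_nums (fun w => lottos.count w),
      ← pv_cast_sum win_nums (fun w => lottos.countP (fun l => decide (l = w - 46 ∨ l = w + 46)))]
  rw [pv_D_char lottos win_nums hpre.1] at hd
  intro heq
  simp only [List.cons.injEq, and_true] at heq
  obtain ⟨h1, h2⟩ := heq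
  simp only [pvF] at h1 h2
  split_ifs at h1 h2 <;> omega
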